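-- pv_equiv track=rewrite | github.com/growcacti/texttools | string mapulation.py | get_word_pattern
-- ===== SOURCE A (Python) =====
-- def get_word_pattern(word: str) -> str:
--     word = word.upper()
--     next_num = 0
--     letter_nums = {}
--     word_pattern = []
--     for letter in word:
--         if letter not in letter_nums:
--             letter_nums[letter] = str(next_num)
--             next_num += 1
--         word_pattern.append(letter_nums[letter])
--     return ".".join(word_pattern)
-- ===== SOURCE B (Python) =====
-- def get_word_pattern(word: str) -> str:
--     word = word.upper()
--     return ".".join(str(len(set(word[:word.index(c)]))) for c in word)
-- ===== Notes on version B (the rewrite author's own statement) =====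
-- stated objective: alternative
-- what changed: Drops the letter->number table entirely: each character's number is recomputed independently as the count of distinct letters strictly before its first occurrence (word.index + set of a prefix slice), a nested-scan formulation instead of A's single stateful assign-on-first-sight loop.
import Mathlib
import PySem

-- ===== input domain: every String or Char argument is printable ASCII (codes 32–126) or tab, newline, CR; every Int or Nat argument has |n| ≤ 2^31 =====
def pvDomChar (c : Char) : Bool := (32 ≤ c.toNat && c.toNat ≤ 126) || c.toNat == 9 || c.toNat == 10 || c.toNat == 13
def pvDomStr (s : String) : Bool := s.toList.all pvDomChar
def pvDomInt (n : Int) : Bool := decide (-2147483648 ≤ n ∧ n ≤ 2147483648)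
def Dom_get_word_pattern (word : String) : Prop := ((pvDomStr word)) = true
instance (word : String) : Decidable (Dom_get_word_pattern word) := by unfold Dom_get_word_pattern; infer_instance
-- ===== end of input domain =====

-- B is table-free: each character's number is recomputed as the count of distinct letters
-- strictly before its first occurrence (alternative nested-scan formulation, not faster).

-- ===== PORT A =====
-- A's loop body: assign a fresh number on first sight, then append the letter's number
def aStep (st : Int × PySem.Dict Char String × List String) (letter : Char) :
    Int × PySem.Dict Char String × List String :=
  let st' :=
    if st.2.1.contains letter then (st.1, st.2.1)
    else (st.1 + 1, st.2.1.insert letter (PySem.Int.toStr st.1))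
  -- Python's letter_nums[letter] never raises here (the key was just ensured); getD "" is exact
  (st'.1, st'.2, st.2.2 ++ [((st'.2.get? letter).getD "")])

def get_word_pattern (word : String) : String :=
  let w := PySem.Str.upper word
  let fin := w.toList.foldl aStep ((0 : Int), PySem.Dict.empty, [])
  PySem.Str.join "." fin.2.2

-- ===== PORT B =====
-- str(len(set(word[:word.index(c)]))) for one character c of word
def bEmit (cs : List Char) (c : Char) : String :=
  -- word.index(c): c is drawn from word itself, so index? is some; getD 0 is exact
  let j := (PySem.List.index? cs c).getD 0
  PySem.Int.toStr (PySem.Set.len (PySem.Set.ofList (PySem.List.slice cs none (some (j : Int)))))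

def get_word_pattern_alt (word : String) : String :=
  let cs := (PySem.Str.upper word).toList
  PySem.Str.join "." (cs.map (bEmit cs))

-- ===== PRECONDITION & SPEC =====
def Spec_get_word_pattern (word : String) (out : String) : Prop := out = get_word_pattern_alt word
instance (word : String) (out : String) : Decidable (Spec_get_word_pattern word out) := by unfold Spec_get_word_pattern; infer_instance

-- ===== CLAIM =====
def Claim_equal_get_word_pattern : Prop := ∀ (word : String), Dom_get_word_pattern word → Spec_get_word_pattern word (get_word_pattern word)

-- ===== LEMMAS AND PROOFS =====

-- the value A emits for letter c: its index in the first-occurrence dedup list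
def pvEmit (full : List Char) (c : Char) : String :=
  ((PySem.List.index? full c).map (fun (k : Nat) => PySem.Int.toStr (k : Int))).getD ""

-- proof-only model of A's dict state: the table after the distinct letters `ls` were assigned
def bInsert (d : PySem.Dict Char String) (p : Int × Char) : PySem.Dict Char String :=
  d.insert p.2 (PySem.Int.toStr p.1)

def bTable (letters : List Char) : PySem.Dict Char String :=
  (PySem.List.enumerate letters 0).foldl bInsert PySem.Dict.empty

theorem pvAStep_mem (n : Int) (d : PySem.Dict Char String) (pat : List String) (c : Char)
    (h : d.contains c = true) :
    aStep (n, d, pat) c = (n, d, pat ++ [((d.get? c).getD "")]) := by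
  simp [aStep, h]

theorem pvAStep_new (n : Int) (d : PySem.Dict Char String) (pat : List String) (c : Char)
    (h : d.contains c = false) :
    aStep (n, d, pat) c =
      (n + 1, d.insert c (PySem.Int.toStr n),
        pat ++ [(((d.insert c (PySem.Int.toStr n)).get? c).getD "")]) := by
  simp [aStep, h]

theorem pvGet?_foldl_of_not_mem (ls : List Char) (c : Char) (h : c ∉ ls) :
    ∀ (s : Int) (d : PySem.Dict Char String),
    ((PySem.List.enumerate ls s).foldl bInsert d).get? c = d.get? c := by
  induction ls with
  | nil => intro s d; rw [PySem.List.enumerate_nil]; rfl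
  | cons x r ih =>
    intro s d
    rw [PySem.List.enumerate_cons, List.foldl_cons,
      ih (fun hr => h (List.mem_cons_of_mem x hr))]
    exact PySem.Dict.get?_insert_of_ne d _ (fun he => h (he ▸ List.mem_cons_self))

theorem pvGet?_foldl_of_mem (ls : List Char) (c : Char) (hnd : ls.Nodup) (hc : c ∈ ls) :
    ∀ (s : Int) (d : PySem.Dict Char String),
    ((PySem.List.enumerate ls s).foldl bInsert d).get? c
      = (PySem.List.index? ls c).map (fun (k : Nat) => PySem.Int.toStr (s + (k : Int))) := by
  induction ls with
  | nil => exact absurd hc (List.not_mem_nil)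
  | cons x r ih =>
    intro s d
    rcases List.nodup_cons.mp hnd with ⟨hx, hr⟩
    rw [PySem.List.enumerate_cons, List.foldl_cons]
    by_cases hcx : c = x
    · subst hcx
      rw [pvGet?_foldl_of_not_mem r c hx, PySem.List.index?_cons_self, Option.map_some]
      show (d.insert c (PySem.Int.toStr s)).get? c = _
      rw [PySem.Dict.get?_insert_self]
      norm_num
    · have hcr : c ∈ r := (List.mem_cons.mp hc).resolve_left hcx
      rw [ih hr hcr (s + 1), PySem.List.index?_cons_of_ne r (Ne.symm hcx)]
      obtain ⟨k, hk⟩ := Option.isSome_iff_exists.mp ((PySem.List.index?_isSome_iff r c).mpr hcr)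
      rw [hk, Option.map_some, Option.map_some, Option.map_some]
      congr 1
      push_cast
      ring_nf

theorem pvGet?_bTable_of_mem (ls : List Char) (c : Char) (hnd : ls.Nodup) (hc : c ∈ ls) :
    (bTable ls).get? c = (PySem.List.index? ls c).map (fun (k : Nat) => PySem.Int.toStr (k : Int)) := by
  rw [bTable, pvGet?_foldl_of_mem ls c hnd hc 0]
  obtain ⟨k, hk⟩ := Option.isSome_iff_exists.mp ((PySem.List.index?_isSome_iff ls c).mpr hc)
  rw [hk, Option.map_some, Option.map_some]
  norm_num

theorem pvContains_bTable (ls : List Char) (c : Char) (hnd : ls.Nodup) :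
    (bTable ls).contains c = decide (c ∈ ls) := by
  rw [PySem.Dict.contains_eq_isSome_get?]
  by_cases hc : c ∈ ls
  · rw [pvGet?_bTable_of_mem ls c hnd hc]
    obtain ⟨k, hk⟩ := Option.isSome_iff_exists.mp ((PySem.List.index?_isSome_iff ls c).mpr hc)
    rw [hk]
    simp [hc]
  · rw [bTable, pvGet?_foldl_of_not_mem ls c hc, PySem.Dict.get?_empty]
    simp [hc]

theorem pvFold_add_append (t : List Char) (s : PySem.Set Char) :
    ∃ t', t.foldl PySem.Set.add s = s ++ t' := by
  induction t generalizing s with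
  | nil => exact ⟨[], by simp⟩
  | cons x r ih =>
    rw [List.foldl_cons]
    by_cases hx : x ∈ s
    · rw [show PySem.Set.add s x = s by simp [PySem.Set.add, PySem.Set.contains, hx]]
      exact ih s
    · rw [show PySem.Set.add s x = s ++ [x] by simp [PySem.Set.add, PySem.Set.contains, hx]]
      obtain ⟨t', ht'⟩ := ih (s ++ [x])
      exact ⟨x :: t', by simpa using ht'⟩

theorem pvDedup_append_ext (ls t : List Char) (h : ls.Nodup) :
    ∃ t', PySem.List.dedup (ls ++ t) = ls ++ t' := by
  rw [PySem.List.dedup_eq_ofList, PySem.Set.ofList_eq_foldl, List.foldl_append,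
    ← PySem.Set.ofList_eq_foldl, PySem.Set.ofList_eq_self_of_nodup ls h]
  exact pvFold_add_append t ls

theorem pvDedup_mid_mem (ls : List Char) (c : Char) (r : List Char) (hc : c ∈ ls) :
    PySem.List.dedup (ls ++ c :: r) = PySem.List.dedup (ls ++ r) := by
  rw [PySem.List.dedup_eq_ofList, PySem.List.dedup_eq_ofList,
    PySem.Set.ofList_eq_foldl, PySem.Set.ofList_eq_foldl, List.foldl_append, List.foldl_append,
    List.foldl_cons]
  have hmem : c ∈ List.foldl PySem.Set.add [] ls := by
    rw [← PySem.Set.ofList_eq_foldl]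
    exact (PySem.Set.mem_ofList ls c).mpr hc
  rw [show PySem.Set.add (List.foldl PySem.Set.add [] ls) c = List.foldl PySem.Set.add [] ls by
    simp [PySem.Set.add, PySem.Set.contains, hmem]]

theorem pvEmit_stable (ls t : List Char) (h : ls.Nodup) (c : Char) (hc : c ∈ ls) :
    pvEmit (PySem.List.dedup (ls ++ t)) c = pvEmit ls c := by
  obtain ⟨t', ht'⟩ := pvDedup_append_ext ls t h
  rw [ht']
  unfold pvEmit
  rw [PySem.List.index?_append_of_mem t' hc]

theorem pvBTable_append_singleton (ls : List Char) (c : Char) :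
    bTable (ls ++ [c]) = (bTable ls).insert c (PySem.Int.toStr (ls.length : Int)) := by
  rw [bTable, bTable, PySem.List.enumerate_append, List.foldl_append,
    PySem.List.enumerate_cons, PySem.List.enumerate_nil, List.foldl_cons, List.foldl_nil]
  show bInsert _ (0 + (ls.length : Int), c) = _
  rw [zero_add]
  rfl

theorem pvLoopA (l : List Char) : ∀ (ls : List Char) (pat : List String), ls.Nodup →
    (l.foldl aStep (((ls.length : Int)), bTable ls, pat)).2.2
    = pat ++ l.map (pvEmit (PySem.List.dedup (ls ++ l))) := by
  induction l with
  | nil => intro ls pat _; simp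
  | cons c r ih =>
    intro ls pat h
    rw [List.foldl_cons]
    by_cases hc : c ∈ ls
    · -- seen letter: state unchanged, emit its existing number
      rw [pvAStep_mem _ _ _ _ (by rw [pvContains_bTable ls c h]; simp [hc]),
        ih ls _ h, pvDedup_mid_mem ls c r hc, List.append_assoc]
      have hval : ((bTable ls).get? c).getD "" = pvEmit ls c := by
        rw [pvGet?_bTable_of_mem ls c h hc]; rfl
      rw [List.map_cons, List.singleton_append, hval,
        ← pvEmit_stable ls r h c hc]
    · -- fresh letter: the insert turns bTable ls into bTable (ls ++ [c])
      rw [pvAStep_new _ _ _ _ (by rw [pvContains_bTable ls c h]; simp [hc]),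
        ← pvBTable_append_singleton ls c,
        show ((ls.length : Int) + 1) = (((ls ++ [c]).length : Nat) : Int) by simp,
        ih (ls ++ [c]) _ (by rw [List.nodup_append]; exact ⟨h, List.nodup_singleton c, by simpa using fun a ha (he : a = c) => hc (he ▸ ha)⟩),
        List.append_assoc]
      have hdd : PySem.List.dedup (ls ++ c :: r) = PySem.List.dedup ((ls ++ [c]) ++ r) := by
        rw [List.append_assoc]; rfl
      have hval : ((bTable (ls ++ [c])).get? c).getD "" = pvEmit (ls ++ [c]) c := by
        rw [pvGet?_bTable_of_mem (ls ++ [c]) c (by rw [List.nodup_append]; exact ⟨h, List.nodup_singleton c, by simpa using fun a ha (he : a = c) => hc (he ▸ ha)⟩) (by simp)]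
        rfl
      rw [hdd, List.map_cons, List.singleton_append, hval,
        ← pvEmit_stable (ls ++ [c]) r (by rw [List.nodup_append]; exact ⟨h, List.nodup_singleton c, by simpa using fun a ha (he : a = c) => hc (he ▸ ha)⟩) c (by simp)]

-- B's per-character value agrees with A's index-in-dedup value for every letter of the word
theorem pvEmit_eq_bEmit (cs : List Char) (c : Char) (hc : c ∈ cs) :
    pvEmit (PySem.List.dedup cs) c = bEmit cs c := by
  obtain ⟨j, hj⟩ := Option.isSome_iff_exists.mp ((PySem.List.index?_isSome_iff cs c).mpr hc)
  obtain ⟨pre, suf, hsplit, hlen, hpre⟩ := (PySem.List.index?_eq_some_iff cs c j).mp hj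
  have hcset : c ∉ PySem.Set.ofList pre := fun h => hpre ((PySem.Set.mem_ofList pre c).mp h)
  have hadd : PySem.Set.add (PySem.Set.ofList pre) c = PySem.Set.ofList pre ++ [c] := by
    simp [PySem.Set.add, PySem.Set.contains, hcset]
  obtain ⟨t', ht'⟩ := pvFold_add_append suf (PySem.Set.ofList pre ++ [c])
  have hidx : PySem.List.index? (PySem.List.dedup cs) c = some (PySem.Set.ofList pre).length := by
    rw [hsplit, PySem.List.dedup_eq_ofList, PySem.Set.ofList_eq_foldl, List.foldl_append,
      List.foldl_cons, ← PySem.Set.ofList_eq_foldl, hadd, ht',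
      PySem.List.index?_append_of_mem t' (by simp : c ∈ PySem.Set.ofList pre ++ [c]),
      PySem.List.index?_append_singleton_self (PySem.Set.ofList pre) c hcset]
  unfold pvEmit bEmit
  rw [hidx, hj]
  have htake : PySem.List.slice cs none (some ((j : Nat) : Int)) = pre := by
    rw [PySem.List.slice_to_natCast, hsplit, ← hlen, List.take_left]
  simp only [Option.map_some, Option.getD_some]
  rw [htake]
  simp [PySem.Set.len]

-- ===== VERDICT =====
theorem get_word_pattern_spec : Claim_equal_get_word_pattern := by
  intro word _
  show (get_word_pattern word) = get_word_pattern_alt word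
  show PySem.Str.join "." ((PySem.Str.upper word).toList.foldl aStep ((0 : Int), PySem.Dict.empty, [])).2.2
    = PySem.Str.join "." ((PySem.Str.upper word).toList.map (bEmit (PySem.Str.upper word).toList))
  have hA := pvLoopA (PySem.Str.upper word).toList [] [] List.nodup_nil
  rw [show bTable [] = PySem.Dict.empty from rfl, List.length_nil, Nat.cast_zero,
    List.nil_append, List.nil_append] at hA
  rw [hA]
  congr 1
  exact List.map_congr_left (fun c hc => pvEmit_eq_bEmit _ c hc)
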